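-- pv_equiv track=rewrite | github.com/lenormandSeb/Enigma_machine | Class/Enigma.py | is_not_valid_plugin
-- ===== SOURCE A (Python) =====
-- def is_not_valid_plugin(plugins) -> bool:
--     used_letter = set()
--     for pair in plugins.split():
--         for letter in pair:
--             if letter in used_letter:
--                 return True
--             used_letter.add(letter)
--     return False
-- ===== SOURCE B (Python) =====
-- def is_not_valid_plugin(plugins) -> bool:
--     letters = sorted(''.join(plugins.split()))
--     return any(a == b for a, b in zip(letters, letters[1:]))
-- ===== Notes on version B (the rewrite author's own statement) =====
-- stated objective: alternative
-- what changed: Replaces A's one-pass scan with a mutated seen-set by a sort-then-adjacent-scan: sort all letters of all pairs, then report a duplicate iff some neighbouring sorted letters are equal (no set involved).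
import Mathlib
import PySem

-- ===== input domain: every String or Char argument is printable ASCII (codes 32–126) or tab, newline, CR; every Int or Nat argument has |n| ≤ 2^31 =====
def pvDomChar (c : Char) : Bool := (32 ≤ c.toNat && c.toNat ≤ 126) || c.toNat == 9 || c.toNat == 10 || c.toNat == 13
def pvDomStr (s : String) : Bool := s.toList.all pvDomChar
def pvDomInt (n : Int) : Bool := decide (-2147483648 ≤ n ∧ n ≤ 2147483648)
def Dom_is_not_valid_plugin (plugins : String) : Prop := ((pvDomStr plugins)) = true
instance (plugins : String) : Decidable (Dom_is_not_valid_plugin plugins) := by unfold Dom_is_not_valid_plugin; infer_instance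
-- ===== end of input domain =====

-- B sorts all letters of all pairs and reports a duplicate iff two neighbouring sorted
-- letters are equal, instead of A's one-pass scan over a mutated seen-set (objective: alternative).

-- ===== PORT A =====
-- inner 'for letter in pair' loop: (true, _) on the early 'return True', else (false, updated set)
def pvGoChars : List Char → PySem.Set Char → Bool × PySem.Set Char
  | [], used => (false, used)
  | c :: cs, used =>
      if PySem.Set.contains used c then (true, used)
      else pvGoChars cs (PySem.Set.add used c)

-- outer 'for pair in plugins.split()' loop
def pvGoPairs : List String → PySem.Set Char → Bool
  | [], _ => false
  | p :: ps, used =>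
      match pvGoChars p.toList used with
      | (true, _) => true
      | (false, used') => pvGoPairs ps used'

def is_not_valid_plugin (plugins : String) : Bool :=
  pvGoPairs (PySem.Str.split₀ plugins) PySem.Set.empty

-- ===== PORT B =====
def is_not_valid_plugin_alt (plugins : String) : Bool :=
  let letters := PySem.List.sorted (PySem.Str.join "" (PySem.Str.split₀ plugins)).toList (fun x => x) false
  (letters.zip (letters.drop 1)).any (fun p => p.1 == p.2)

-- ===== PRECONDITION & SPEC =====
def Spec_is_not_valid_plugin (plugins : String) (out : Bool) : Prop := out = is_not_valid_plugin_alt plugins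
instance (plugins : String) (out : Bool) : Decidable (Spec_is_not_valid_plugin plugins out) := by unfold Spec_is_not_valid_plugin; infer_instance

-- ===== CLAIM (what is proved, stated in full; the proofs are below) =====
def Claim_equal_is_not_valid_plugin : Prop := ∀ (plugins : String), Dom_is_not_valid_plugin plugins → Spec_is_not_valid_plugin plugins (is_not_valid_plugin plugins)

-- ===== LEMMAS AND PROOFS =====

-- when no duplicate arises, the inner loop just appends the new chars
theorem pvGoChars_of_nodup (cs : List Char) (used : PySem.Set Char)
    (h : (used ++ cs).Nodup) : pvGoChars cs used = (false, used ++ cs) := by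
  induction cs generalizing used with
  | nil => simp [pvGoChars]
  | cons c cs ih =>
      have hc : c ∉ used := by
        intro hm
        exact (List.disjoint_of_nodup_append h hm) (by simp)
      rw [pvGoChars]
      rw [if_neg (by simpa [PySem.Set.contains] using hc)]
      have hadd : PySem.Set.add used c = used ++ [c] := by
        simp [PySem.Set.add, PySem.Set.contains, hc]
      rw [hadd, ih (used ++ [c]) (by simpa using h)]
      simp

theorem pvGoChars_fst_of_not_nodup (cs : List Char) (used : PySem.Set Char)
    (hu : used.Nodup) (h : ¬ (used ++ cs).Nodup) : (pvGoChars cs used).1 = true := by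
  induction cs generalizing used with
  | nil => exact absurd (by simpa using hu) h
  | cons c cs ih =>
      rw [pvGoChars]
      by_cases hc : c ∈ used
      · rw [if_pos (by simpa [PySem.Set.contains] using hc)]
      · rw [if_neg (by simpa [PySem.Set.contains] using hc)]
        have hadd : PySem.Set.add used c = used ++ [c] := by
          simp [PySem.Set.add, PySem.Set.contains, hc]
        rw [hadd]
        refine ih (used ++ [c]) ?_ ?_
        · simp [List.nodup_append, hu]
          exact fun a ha he => hc (he ▸ ha)
        · intro hn
          exact h (by simpa using hn)

-- A's nested loop returns true exactly when the concatenation of all pairs has a duplicate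
theorem pvGoPairs_eq (ps : List String) (used : PySem.Set Char)
    (hu : used.Nodup) :
    pvGoPairs ps used = !decide ((used ++ ps.flatMap String.toList).Nodup) := by
  induction ps generalizing used with
  | nil => simp [pvGoPairs, hu]
  | cons p ps ih =>
      rw [pvGoPairs]
      by_cases h : (used ++ p.toList).Nodup
      · rw [pvGoChars_of_nodup _ _ h]
        show pvGoPairs ps (used ++ p.toList) = _
        rw [ih (used ++ p.toList) h]
        simp [List.append_assoc]
      · have h1 := pvGoChars_fst_of_not_nodup p.toList used hu h
        rcases hg : pvGoChars p.toList used with ⟨b, u'⟩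
        rw [hg] at h1; simp at h1; subst h1
        have hnn : ¬ (used ++ (p.toList ++ ps.flatMap String.toList)).Nodup := by
          intro hn
          exact h (hn.sublist (((List.sublist_append_left p.toList
            (ps.flatMap String.toList))).append_left used))
        simp only [List.flatMap_cons]
        rw [← List.append_assoc] at hnn
        simp [← List.append_assoc, hnn]

-- ''.join with empty separator is concatenation
theorem pvJoinNilFlatten : ∀ ls : List (List Char), PySem.Chars.join [] ls = ls.flatten
  | [] => by simp [PySem.Chars.join_nil]
  | [a] => by simp [PySem.Chars.join_singleton]
  | a :: b :: t => by
      rw [PySem.Chars.join_cons_cons, pvJoinNilFlatten (b :: t)]; simp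

-- in a ≤-sorted list, a pair of equal neighbours exists iff the list has a duplicate
theorem pvAdjEq_of_pairwise (l : List Char) (h : l.Pairwise (· ≤ ·)) :
    (l.zip (l.drop 1)).any (fun p => p.1 == p.2) = !decide l.Nodup := by
  induction l with
  | nil => simp
  | cons a t ih =>
      cases t with
      | nil => simp
      | cons b t =>
          have htail : (b :: t).Pairwise (· ≤ ·) := h.tail
          have hrest := ih htail
          by_cases hab : a = b
          · subst hab
            simp [List.zip]
          · have hnm : a ∉ b :: t := by
              intro hm
              rcases List.mem_cons.1 hm with he | hmt
              · exact hab he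
              · have h1 : a ≤ b := (List.pairwise_cons.1 h).1 b (by simp)
                have h2 : b ≤ a := (List.pairwise_cons.1 htail).1 a hmt
                exact hab (le_antisymm h1 h2)
            have : (((a :: b :: t).zip ((a :: b :: t).drop 1)).any (fun p => p.1 == p.2))
                = (((b :: t).zip ((b :: t).drop 1)).any (fun p => p.1 == p.2)) := by
              simp [List.zip, hab]
            rw [this, hrest]
            simp [List.nodup_cons, hnm]

-- ===== VERDICT (by name: the statement is the Claim_ definition above) =====
theorem is_not_valid_plugin_spec : Claim_equal_is_not_valid_plugin := by
  intro plugins _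
  show is_not_valid_plugin plugins = is_not_valid_plugin_alt plugins
  simp only [is_not_valid_plugin, is_not_valid_plugin_alt]
  have hA := pvGoPairs_eq (PySem.Str.split₀ plugins) PySem.Set.empty (by simp [PySem.Set.empty])
  rw [hA]
  set L := (PySem.Str.join "" (PySem.Str.split₀ plugins)).toList with hLdef
  have hLf : L = (PySem.Str.split₀ plugins).flatMap String.toList := by
    simp [hLdef, PySem.Str.toList_join, pvJoinNilFlatten, List.flatMap_def]
  set S := PySem.List.sorted L (fun x => x) false with hSdef
  have hpw : S.Pairwise (· ≤ ·) := PySem.List.sorted_pairwise L (fun x => x)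
  have hperm : S.Perm L := PySem.List.sorted_perm L (fun x => x) false
  rw [pvAdjEq_of_pairwise S hpw]
  have : S.Nodup ↔ (PySem.Set.empty ++ List.flatMap String.toList (PySem.Str.split₀ plugins)).Nodup := by
    rw [hperm.nodup_iff, hLf]; simp [PySem.Set.empty]
  simp [this]
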